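-- pv_equiv track=rewrite | github.com/pacotimekeeper/dash_utils | text_utils.py | masked_pattern
-- ===== SOURCE A (Python) =====
-- def masked_pattern(numbers: list[str]) -> str:
--     """
--     Build a pattern from a list of equal-length strings where the common prefix is kept
--     and the differing suffix is replaced with 'X' characters.
--     """
--     if not numbers:
--         raise ValueError("numbers must contain at least one element")
--
--     prefix = numbers[0]
--     for s in numbers[1:]:
--         max_idx = min(len(prefix), len(s))
--         i = 0
--         while i < max_idx and prefix[i] == s[i]:
--             i += 1
--         prefix = prefix[:i]
--         if not prefix:
--             break
--
--     variation_length = len(numbers[0]) - len(prefix)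
--     return prefix + "X" * variation_length
-- ===== SOURCE B (Python) =====
-- def masked_pattern(numbers: list[str]) -> str:
--     """Column-wise scan: count matching leading columns across all strings, then mask the rest."""
--     if not numbers:
--         raise ValueError("numbers must contain at least one element")
--     first = numbers[0]
--     rest = numbers[1:]
--     plen = 0
--     for ch in first:
--         if any(plen >= len(s) or s[plen] != ch for s in rest):
--             break
--         plen += 1
--     return first[:plen] + "X" * (len(first) - plen)
-- ===== Notes on version B (the rewrite author's own statement) =====
-- stated objective: simpler
-- what changed: Replaces the pairwise prefix-reduction (shrinking a prefix string against each element with an inner while loop) by a single column-wise scan that counts leading positions on which every string agrees with the first, then masks the rest.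
import Mathlib
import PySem

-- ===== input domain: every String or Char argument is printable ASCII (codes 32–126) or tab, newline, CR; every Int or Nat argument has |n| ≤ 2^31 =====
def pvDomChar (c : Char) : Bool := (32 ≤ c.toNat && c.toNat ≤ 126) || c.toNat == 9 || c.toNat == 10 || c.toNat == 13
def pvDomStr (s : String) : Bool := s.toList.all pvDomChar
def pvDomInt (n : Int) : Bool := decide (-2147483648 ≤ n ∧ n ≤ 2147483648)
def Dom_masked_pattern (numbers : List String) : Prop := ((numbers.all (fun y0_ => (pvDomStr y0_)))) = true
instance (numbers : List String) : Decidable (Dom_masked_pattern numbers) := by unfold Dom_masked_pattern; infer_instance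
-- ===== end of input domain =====

-- B replaces A's pairwise prefix reduction by a single column-wise scan (simpler decomposition, same cost).

-- ===== PORT A =====
-- while i < max_idx and prefix[i] == s[i]: i += 1   (indices are in range, so getD's default is never used)
def mpLoopI (p s : List Char) (i : Nat) : Nat :=
  if i < min p.length s.length then
    if p.getD i default == s.getD i default then mpLoopI p s (i+1) else i
  else i
termination_by min p.length s.length - i

-- for s in numbers[1:]: shrink prefix; break when it becomes empty
def mpFold (p : List Char) (rest : List String) : List Char :=
  match rest with
  | [] => p
  | s :: rest =>
    let i := mpLoopI p s.toList 0
    let p' := p.take i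
    if p'.isEmpty then p' else mpFold p' rest

def masked_pattern (numbers : List String) : String :=
  match numbers with
  | [] => ""   -- Python raises ValueError here; excluded by Pre_
  | n0 :: rest =>
    let f := n0.toList
    let pre := mpFold f rest
    String.ofList (pre ++ List.replicate (f.length - pre.length) 'X')

-- ===== PORT B =====
-- for ch in first: break at the first column where some other string is too short or disagrees
def bScan (rsts : List (List Char)) : List Char → Nat → Nat
  | [], plen => plen
  | c :: cs, plen =>
    if rsts.any (fun s => decide (s.length ≤ plen) || s.getD plen default != c) then plen
    else bScan rsts cs (plen + 1)

def masked_pattern_alt (numbers : List String) : String :=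
  match numbers with
  | [] => ""   -- Python raises ValueError here; excluded by Pre_
  | n0 :: rest =>
    let f := n0.toList
    let plen := bScan (rest.map (fun s => s.toList)) f 0
    String.ofList (f.take plen ++ List.replicate (f.length - plen) 'X')

-- ===== PRECONDITION & SPEC =====
-- Python A raises ValueError on the empty list; Pre_ excludes exactly that input.
def Pre_masked_pattern (numbers : List String) : Prop := numbers ≠ []
instance (numbers : List String) : Decidable (Pre_masked_pattern numbers) := by
  unfold Pre_masked_pattern; infer_instance
def pvWitness_masked_pattern : List String := ["abc", "abd"]

def Spec_masked_pattern (numbers : List String) (out : String) : Prop := out = masked_pattern_alt numbers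
instance (numbers : List String) (out : String) : Decidable (Spec_masked_pattern numbers out) := by
  unfold Spec_masked_pattern; infer_instance

-- ===== CLAIM (what is proved, stated in full; the proofs are below) =====
def Claim_equal_masked_pattern : Prop := ∀ (numbers : List String), Dom_masked_pattern numbers → Pre_masked_pattern numbers → Spec_masked_pattern numbers (masked_pattern numbers)

-- ===== LEMMAS AND PROOFS =====

-- length of the longest common prefix of two char lists
def cpl : List Char → List Char → Nat
  | a :: as, b :: bs => if a == b then cpl as bs + 1 else 0
  | _, _ => 0

theorem cpl_le_left : ∀ (f s : List Char), cpl f s ≤ f.length := by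
  intro f
  induction f with
  | nil => intro s; cases s <;> simp [cpl]
  | cons a as ih =>
    intro s
    cases s with
    | nil => simp [cpl]
    | cons b bs =>
      simp only [cpl, List.length_cons]
      split <;> simp_all

theorem cpl_le_right : ∀ (f s : List Char), cpl f s ≤ s.length := by
  intro f
  induction f with
  | nil => intro s; cases s <;> simp [cpl]
  | cons a as ih =>
    intro s
    cases s with
    | nil => simp [cpl]
    | cons b bs =>
      simp only [cpl, List.length_cons]
      split <;> simp_all

theorem cpl_succ_iff : ∀ (i : Nat) (f s : List Char),
    i + 1 ≤ cpl f s ↔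
      i ≤ cpl f s ∧ i < f.length ∧ i < s.length ∧ f.getD i default = s.getD i default := by
  intro i
  induction i with
  | zero =>
    intro f s
    cases f with
    | nil => simp [cpl]
    | cons a as =>
      cases s with
      | nil => simp [cpl]
      | cons b bs =>
        simp only [cpl, List.getD_cons_zero, List.length_cons]
        split <;> simp_all
  | succ i ih =>
    intro f s
    cases f with
    | nil => simp [cpl]
    | cons a as =>
      cases s with
      | nil => simp [cpl]
      | cons b bs =>
        simp only [cpl, List.getD_cons_succ, List.length_cons]
        split
        · constructor
          · intro h
            obtain ⟨h1, h2, h3, h4⟩ := (ih as bs).mp (by omega)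
            exact ⟨by omega, by omega, by omega, h4⟩
          · rintro ⟨h1, h2, h3, h4⟩
            have := (ih as bs).mpr ⟨by omega, by omega, by omega, h4⟩
            omega
        · constructor
          · intro h; omega
          · rintro ⟨h1, -⟩; omega

theorem mpLoopI_eq : ∀ (p s : List Char) (i : Nat), i ≤ cpl p s → mpLoopI p s i = cpl p s := by
  intro p s i
  fun_induction mpLoopI p s i with
  | case1 i hlt heq ih =>
    intro h
    have hgd : p.getD i default = s.getD i default := by simpa using heq
    have hsucc : i + 1 ≤ cpl p s :=
      (cpl_succ_iff i p s).mpr ⟨h, by omega, by omega, hgd⟩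
    exact ih hsucc
  | case2 i hlt heq =>
    intro h
    have hgd : ¬ p.getD i default = s.getD i default := by simpa using heq
    have : ¬ (i + 1 ≤ cpl p s) := fun hs => hgd ((cpl_succ_iff i p s).mp hs).2.2.2
    omega
  | case3 i hlt =>
    intro h
    have h1 := cpl_le_left p s
    have h2 := cpl_le_right p s
    omega

theorem cpl_take_left : ∀ (k : Nat) (f s : List Char), cpl (f.take k) s = min k (cpl f s) := by
  intro k
  induction k with
  | zero => intro f s; cases f <;> cases s <;> simp [cpl]
  | succ k ih =>
    intro f s
    cases f with
    | nil => cases s <;> simp [cpl]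
    | cons a as =>
      cases s with
      | nil => simp [cpl]
      | cons b bs =>
        simp only [List.take_succ_cons, cpl]
        split <;> simp [ih]

-- min-fold over the common-prefix lengths: the value both programs compute
def mval (f : List Char) (rsts : List (List Char)) : Nat :=
  rsts.foldl (fun m s => min m (cpl f s)) f.length

theorem foldl_min_le_init {α : Type} (g : α → Nat) :
    ∀ (l : List α) (a : Nat), l.foldl (fun m s => min m (g s)) a ≤ a := by
  intro l
  induction l with
  | nil => simp
  | cons x xs ih => intro a; have := ih (min a (g x)); simp only [List.foldl]; omega

theorem foldl_min_le_mem {α : Type} (g : α → Nat) :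
    ∀ (l : List α) (a : Nat) (x : α), x ∈ l → l.foldl (fun m s => min m (g s)) a ≤ g x := by
  intro l
  induction l with
  | nil => simp
  | cons y ys ih =>
    intro a x hx
    rcases List.mem_cons.mp hx with h | h
    · subst h
      have := foldl_min_le_init g ys (min a (g x)); simp only [List.foldl]; omega
    · simpa using ih (min a (g y)) x h

theorem le_foldl_min {α : Type} (g : α → Nat) :
    ∀ (l : List α) (a k : Nat), k ≤ a → (∀ x ∈ l, k ≤ g x) →
      k ≤ l.foldl (fun m s => min m (g s)) a := by
  intro l
  induction l with
  | nil => simp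
  | cons y ys ih =>
    intro a k ha h
    simp only [List.foldl]
    exact ih _ k (by have := h y (by simp); omega) (fun x hx => h x (List.mem_cons_of_mem _ hx))

theorem foldl_min_capped {α : Type} (g : α → Nat) (i : Nat) :
    ∀ (l : List α) (a : Nat), a ≤ i →
      l.foldl (fun m s => min m (min i (g s))) a = l.foldl (fun m s => min m (g s)) a := by
  intro l
  induction l with
  | nil => simp
  | cons y ys ih =>
    intro a ha
    simp only [List.foldl]
    rw [show min a (min i (g y)) = min a (g y) by
      rw [← Nat.min_assoc, Nat.min_eq_left ha]]
    exact ih _ (by omega)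

theorem mpFold_eq : ∀ (rest : List String) (p : List Char),
    mpFold p rest = p.take (mval p (rest.map (fun s => s.toList))) := by
  intro rest
  induction rest with
  | nil => intro p; simp [mpFold, mval]
  | cons s rest ih =>
    intro p
    simp only [mpFold, List.map_cons]
    rw [mpLoopI_eq p s.toList 0 (Nat.zero_le _)]
    set i := cpl p s.toList with hi
    have hile : i ≤ p.length := cpl_le_left _ _
    simp only [mval, List.foldl]
    rw [show min p.length i = i by omega]
    by_cases hemp : (p.take i).isEmpty
    · simp only [hemp, if_true]
      rcases List.isEmpty_iff.mp hemp with h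
      have : i = 0 ∨ p = [] := by
        rcases Nat.eq_zero_or_pos i with h0 | h0
        · exact Or.inl h0
        · right
          by_contra hp
          have : p.take i ≠ [] := by
            simp [List.take_eq_nil_iff]
            constructor <;> [omega; exact hp]
          exact this h
      have hz : (rest.map (fun s => s.toList)).foldl (fun m t => min m (cpl p t)) i = 0 := by
        have hli := foldl_min_le_init (fun t : List Char => cpl p t) (rest.map (fun s => s.toList)) i
        rcases this with h0 | h0
        · omega
        · have : i = 0 := by rw [hi, h0]; simp [cpl]
          omega
      rw [h, hz]
      simp
    · rw [if_neg hemp, ih (p.take i)]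
      have hlen : (p.take i).length = i := by simp; omega
      have hcap : mval (p.take i) (rest.map (fun s => s.toList)) =
          (rest.map (fun s => s.toList)).foldl (fun m t => min m (cpl p t)) i := by
        simp only [mval, hlen]
        have : ∀ t : List Char, cpl (p.take i) t = min i (cpl p t) := fun t => cpl_take_left i p t
        calc (rest.map (fun s => s.toList)).foldl (fun m t => min m (cpl (p.take i) t)) i
            = (rest.map (fun s => s.toList)).foldl (fun m t => min m (min i (cpl p t))) i := by
              simp only [this]
          _ = _ := foldl_min_capped _ i _ i (le_refl i)
      rw [hcap, List.take_take]
      have hX := foldl_min_le_init (fun t : List Char => cpl p t) (rest.map (fun s => s.toList)) i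
      rw [Nat.min_eq_left hX]

theorem bScan_eq (f : List Char) (rsts : List (List Char)) :
    ∀ (cs : List Char) (i : Nat), cs = f.drop i → i ≤ mval f rsts →
      bScan rsts cs i = mval f rsts := by
  intro cs
  induction cs with
  | nil =>
    intro i hdrop hle
    have hif : f.length ≤ i := by
      by_contra h
      have : f.drop i ≠ [] := by simp [List.drop_eq_nil_iff]; omega
      exact this hdrop.symm
    have h2 : mval f rsts ≤ f.length := foldl_min_le_init (fun s : List Char => cpl f s) rsts f.length
    simp only [bScan]
    omega
  | cons c cs ih =>
    intro i hdrop hle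
    have hif : i < f.length := by
      by_contra h
      have : f.drop i = [] := by simp [List.drop_eq_nil_iff]; omega
      rw [this] at hdrop; exact absurd hdrop (by simp)
    have hc : c = f.getD i default := by
      have h0 : (f.drop i).getD 0 default = f.getD i default := by
        simp [List.getD, List.getElem?_drop]
      rw [← hdrop] at h0
      simpa using h0
    simp only [bScan]
    by_cases hany : rsts.any (fun s => decide (s.length ≤ i) || s.getD i default != c)
    · simp only [hany, if_true]
      rcases List.any_eq_true.mp hany with ⟨s, hs, hcond⟩
      have hcpl : cpl f s ≤ i := by
        rcases Bool.or_eq_true_iff.mp hcond with h | h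
        · have : s.length ≤ i := of_decide_eq_true h
          have := cpl_le_right f s; omega
        · have hne : s.getD i default ≠ c := by simpa using h
          by_contra hgt
          have := (cpl_succ_iff i f s).mp (by omega)
          exact hne (by rw [hc]; exact this.2.2.2.symm)
      have h3 : mval f rsts ≤ cpl f s := foldl_min_le_mem (fun s : List Char => cpl f s) rsts f.length s hs
      omega
    · simp only [hany]
      have hall : ∀ s ∈ rsts, i < s.length ∧ s.getD i default = c := by
        intro s hs
        have := fun hcond => hany (List.any_eq_true.mpr ⟨s, hs, hcond⟩)
        constructor
        · by_contra h
          exact this (by simp; omega)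
        · by_contra h
          exact this (by
            simp only [Bool.or_eq_true, bne_iff_ne, ne_eq]
            right; exact h)
      have hnext : i + 1 ≤ mval f rsts := by
        show i + 1 ≤ rsts.foldl (fun m s => min m (cpl f s)) f.length
        apply le_foldl_min
        · omega
        · intro s hs
          rcases hall s hs with ⟨h1, h2⟩
          apply (cpl_succ_iff i f s).mpr
          refine ⟨?_, hif, h1, by rw [hc] at h2; exact h2.symm⟩
          have h4 : mval f rsts ≤ cpl f s := foldl_min_le_mem (fun s : List Char => cpl f s) rsts f.length s hs
          omega
      have hdd : cs = List.drop (i + 1) f := by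
        have htl := congrArg List.tail hdrop
        simpa [List.tail_drop] using htl
      exact ih (i + 1) hdd hnext

-- ===== VERDICT (by name: the statement is the Claim_ definition above) =====
theorem masked_pattern_spec : Claim_equal_masked_pattern := by
  intro numbers _ hpre
  unfold Spec_masked_pattern
  match numbers with
  | [] => exact absurd rfl hpre
  | n0 :: rest =>
    simp only [masked_pattern, masked_pattern_alt]
    set f := n0.toList with hf
    set rsts := rest.map (fun s => s.toList) with hrsts
    have hL : mval f rsts ≤ f.length := foldl_min_le_init (fun s : List Char => cpl f s) rsts f.length
    have hBs : bScan rsts f 0 = mval f rsts := bScan_eq f rsts f 0 (by simp) (Nat.zero_le _)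
    have hAs : mpFold f rest = f.take (mval f rsts) := mpFold_eq rest f
    rw [hAs, hBs]
    have : (f.take (mval f rsts)).length = mval f rsts := by
      simp; omega
    rw [this]
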